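-- pv_equiv track=rewrite | github.com/maximofn/portafolio | src/markdown_lists_to_html.py | markdown_to_html_updated
-- ===== SOURCE A (Python) =====
-- def markdown_to_html_updated(markdown_text):
--     """
--     Converts Markdown text with unordered lists (including nested ones) to HTML.
--     Handles lists starting with '-', '*', or '+'.
--     Indentation (2 spaces) determines nesting.
--     """
--     lines = markdown_text.strip().split('\n')
--     html_lines = []
--     list_level_markers = {}  # Stores the type of list marker ('ul' or 'ol') at each level
--
--     def get_indent_level(line_text):
--         # More robust way to count leading spaces
--         leading_spaces = 0
--         for char in line_text:
--             if char == ' ':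
--                 leading_spaces += 1
--             else:
--                 break
--         return leading_spaces // 2
--
--     def close_lists(current_level):
--         closed_html = ""
--         levels_to_close = sorted([lvl for lvl in list_level_markers if lvl > current_level], reverse=True)
--         for lvl in levels_to_close:
--             if list_level_markers[lvl] == 'ul':
--                 closed_html += "  " * lvl + "</ul>\n"
--             del list_level_markers[lvl]
--         return closed_html
--
--     for line in lines:
--         stripped_line = line.strip()
--         if not stripped_line:
--             continue
--
--         indent_level = get_indent_level(line)
--         is_unordered_list_item = stripped_line.startswith(('-', '*', '+')) and stripped_line[1:2] == ' '
--
--         if is_unordered_list_item: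
--             # Ensure content is stripped of leading/trailing whitespace from the original line part
--             item_content = line.strip()[2:].strip() # Strip the content itself
--
--             # Close deeper lists if current item is at a shallower level
--             html_lines.append(close_lists(indent_level))
--
--             if indent_level not in list_level_markers:
--                 # Start a new list
--                 list_level_markers[indent_level] = 'ul'
--                 # Corrected: The <ul> tag should also be indented according to its level
--                 html_lines.append("  " * indent_level + "<ul>\n")
--
--             # Corrected: The <li> tag should be indented one level deeper than its <ul>
--             html_lines.append("  " * (indent_level + 1) + f"<li>{item_content}</li>\n")
--         else:
--             # Non-list item, close all open lists
--             html_lines.append(close_lists(-1)) # Close all lists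
--             # We'll just append non-list lines as paragraphs for simplicity,
--             # though the request is focused on list conversion.
--             html_lines.append(f"<p>{stripped_line}</p>\n")
--
--
--     # Close any remaining open lists at the end
--     html_lines.append(close_lists(-1))
--
--     return "".join(html_lines).strip()
-- ===== SOURCE B (Python) =====
-- def markdown_to_html_updated(markdown_text):
--     """
--     Converts Markdown text with unordered lists (including nested ones) to HTML.
--     Two stages: tokenize the lines, then render the token list by recursive
--     descent (each <ul> block owns the following deeper items), with no
--     mutable open-level state at all.
--     """
--     # Stage 1: tokenize. (level, content) for a list item, (None, text) otherwise.
--     tokens = []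
--     for line in markdown_text.strip().split('\n'):
--         s = line.strip()
--         if not s:
--             continue
--         if s[0] in '-*+' and s[1:2] == ' ':
--             level = (len(line) - len(line.lstrip(' '))) // 2
--             tokens.append((level, s[2:].strip()))
--         else:
--             tokens.append((None, s))
--
--     def item_run(ts, level):
--         # longest prefix of ts made of items with level' >= level, and the rest
--         i = 0
--         while i < len(ts) and ts[i][0] is not None and ts[i][0] >= level:
--             i += 1
--         return ts[:i], ts[i:]
--
--     def body(level, ts):
--         # ts: items nested inside the <ul> at `level` (all levels >= level)
--         if not ts:
--             return ""
--         (l2, c), rest = ts[0], ts[1:]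
--         if l2 == level:
--             return "  " * (level + 1) + f"<li>{c}</li>\n" + body(level, rest)
--         inner, after = item_run(rest, l2)
--         return ("  " * l2 + "<ul>\n" + "  " * (l2 + 1) + f"<li>{c}</li>\n"
--                 + body(l2, inner) + "  " * l2 + "</ul>\n" + body(level, after))
--
--     def render(ts):
--         if not ts:
--             return ""
--         (l, c), rest = ts[0], ts[1:]
--         if l is None:
--             return f"<p>{c}</p>\n" + render(rest)
--         inner, after = item_run(rest, l)
--         return ("  " * l + "<ul>\n" + "  " * (l + 1) + f"<li>{c}</li>\n"
--                 + body(l, inner) + "  " * l + "</ul>\n" + render(after))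
--
--     return render(tokens).strip()
-- ===== Notes on version B (the rewrite author's own statement) =====
-- stated objective: alternative
-- what changed: Replaces A's single-pass state machine (a dict of currently-open list levels, closed by sorting its keys descending at every line) with a two-stage pipeline: tokenize the lines into (level, content)/paragraph tokens, then render the token list by recursive descent in which each <ul> block recursively owns the following deeper items, so no open-level state exists at all and closing tags fall out of the recursion structure.
import Mathlib
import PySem

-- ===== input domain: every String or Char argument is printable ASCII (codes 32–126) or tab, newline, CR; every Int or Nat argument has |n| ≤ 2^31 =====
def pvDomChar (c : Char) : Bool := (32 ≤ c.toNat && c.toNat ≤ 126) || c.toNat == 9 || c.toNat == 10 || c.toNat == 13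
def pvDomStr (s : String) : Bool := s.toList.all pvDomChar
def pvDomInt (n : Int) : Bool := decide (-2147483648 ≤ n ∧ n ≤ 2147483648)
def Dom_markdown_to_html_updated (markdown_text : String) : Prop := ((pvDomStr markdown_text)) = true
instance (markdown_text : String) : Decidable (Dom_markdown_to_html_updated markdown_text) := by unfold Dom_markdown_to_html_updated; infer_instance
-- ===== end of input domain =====

-- B replaces A's single-pass state machine (dict of open levels closed via a sorted key scan)
-- with a two-stage tokenize + recursive-descent renderer that nests <ul> blocks by recursion,
-- holding no open-level state at all (objective: alternative).

-- "  " * n  (empty for n ≤ 0, exactly as in Python); shared by both ports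
def pvRep2 (n : Int) : List Char := (List.replicate n.toNat [' ', ' ']).flatten

-- ===== PORT A =====

-- get_indent_level's loop counting leading ' ' (stops at the first non-space)
def pvCountSpacesA : List Char → Int
  | [] => 0
  | c :: rest => if c = ' ' then 1 + pvCountSpacesA rest else 0

def pvIndentA (line : List Char) : Int := PySem.Int.floordiv (pvCountSpacesA line) 2

-- close_lists: sort the dict keys > current_level descending, emit "</ul>" for each, delete them.
-- (list_level_markers[lvl] is ported as getD with default []: the key is always present there.)
def pvCloseA (d : PySem.Dict Int (List Char)) (c : Int) :
    List Char × PySem.Dict Int (List Char) :=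
  let levels := PySem.List.sorted ((PySem.Dict.keys d).filter (fun l => decide (c < l)))
      (fun x => x) true
  levels.foldl (fun (acc : List Char × PySem.Dict Int (List Char)) lvl =>
    ((if PySem.Dict.getD acc.2 lvl [] == ['u', 'l'] then
        acc.1 ++ pvRep2 lvl ++ "</ul>\n".toList else acc.1),
     PySem.Dict.erase acc.2 lvl)) ([], d)

def pvStepA (st : List (List Char) × PySem.Dict Int (List Char)) (line : List Char) :
    List (List Char) × PySem.Dict Int (List Char) :=
  let stripped := PySem.Chars.strip line
  if stripped = [] then st
  else
    let indentLevel := pvIndentA line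
    let isItem := (PySem.Chars.startswith stripped ['-'] || PySem.Chars.startswith stripped ['*']
        || PySem.Chars.startswith stripped ['+'])
      && (PySem.List.slice stripped (some 1) (some 2) == [' '])
    if isItem then
      let content := PySem.Chars.strip (PySem.List.slice (PySem.Chars.strip line) (some 2) none)
      let cl := pvCloseA st.2 indentLevel
      let html1 := st.1 ++ [cl.1]
      let opened :=
        if PySem.Dict.contains cl.2 indentLevel then (html1, cl.2)
        else (html1 ++ [pvRep2 indentLevel ++ "<ul>\n".toList],
              PySem.Dict.insert cl.2 indentLevel ['u', 'l'])
      (opened.1 ++ [pvRep2 (indentLevel + 1) ++ "<li>".toList ++ content ++ "</li>\n".toList],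
       opened.2)
    else
      let cl := pvCloseA st.2 (-1)
      (st.1 ++ [cl.1] ++ ["<p>".toList ++ stripped ++ "</p>\n".toList], cl.2)

def markdown_to_html_updated (markdown_text : String) : String :=
  let lines := PySem.Chars.splitOn (PySem.Chars.strip markdown_text.toList) ['\n']
  let r := lines.foldl pvStepA ([], PySem.Dict.mk [])
  String.ofList (PySem.Chars.strip (PySem.Chars.join [] (r.1 ++ [(pvCloseA r.2 (-1)).1])))

-- ===== PORT B =====

-- (len(line) - len(line.lstrip(' '))) // 2 ; lstrip(' ') is dropWhile (· = ' ') — exact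
def pvIndentB (line : List Char) : Int :=
  PySem.Int.floordiv ((line.length : Int) - ((line.dropWhile (fun c => c == ' ')).length : Int)) 2

-- loop body of the tokenizer: None to skip a blank line, (Some level, content) for a
-- list item, (None-level, stripped text) for a paragraph line
def pvParseTok (line : List Char) : Option (Option Int × List Char) :=
  let s := PySem.Chars.strip line
  if s = [] then none
  else if ((match PySem.List.pyGet? s 0 with
        | some c => PySem.Chars.isIn [c] ['-', '*', '+']
        | none => false)
      && (PySem.List.slice s (some 1) (some 2) == [' '])) then
    some (some (pvIndentB line), PySem.Chars.strip (PySem.List.slice s (some 2) none))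
  else some (none, s)

def pvTokenize (lines : List (List Char)) : List (Option Int × List Char) :=
  lines.foldl (fun acc line => match pvParseTok line with
    | none => acc
    | some t => acc ++ [t]) []

-- item_run's while loop: longest prefix of items with level' >= level, and the rest
def pvRunP (level : Int) (t : Option Int × List Char) : Bool :=
  match t.1 with
  | some l2 => decide (level ≤ l2)
  | none => false

def pvItemRun (level : Int) :
    List (Option Int × List Char) → List (Option Int × List Char) × List (Option Int × List Char)
  | [] => ([], [])
  | t :: ts =>
    if pvRunP level t then
      let r := pvItemRun level ts
      (t :: r.1, r.2)
    else ([], t :: ts)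

-- termination facts for the recursive renderer (cited in decreasing_by)
theorem pvItemRun_fst_len (level : Int) (ts : List (Option Int × List Char)) :
    (pvItemRun level ts).1.length ≤ ts.length := by
  induction ts with
  | nil => simp [pvItemRun]
  | cons t ts ih =>
    rw [pvItemRun]
    split
    · simpa using ih
    · simp

theorem pvItemRun_snd_len (level : Int) (ts : List (Option Int × List Char)) :
    (pvItemRun level ts).2.length ≤ ts.length := by
  induction ts with
  | nil => simp [pvItemRun]
  | cons t ts ih =>
    rw [pvItemRun]
    split
    · exact le_trans ih (by simp)
    · simp

def pvBody (level : Int) : List (Option Int × List Char) → List Char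
  | [] => []
  | t :: rest =>
    match t.1 with
    | some l2 =>
      if l2 == level then
        pvRep2 (level + 1) ++ "<li>".toList ++ t.2 ++ "</li>\n".toList ++ pvBody level rest
      else
        let p := pvItemRun l2 rest
        pvRep2 l2 ++ "<ul>\n".toList ++ pvRep2 (l2 + 1) ++ "<li>".toList ++ t.2
          ++ "</li>\n".toList ++ pvBody l2 p.1 ++ pvRep2 l2 ++ "</ul>\n".toList
          ++ pvBody level p.2
    | none => []  -- unreachable: body only ever receives item tokens
  termination_by ts => ts.length
  decreasing_by
  all_goals simp only [List.length_cons]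
  all_goals first
    | omega
    | exact lt_of_le_of_lt (pvItemRun_fst_len _ _) (by simp)
    | exact lt_of_le_of_lt (pvItemRun_snd_len _ _) (by simp)

def pvRender : List (Option Int × List Char) → List Char
  | [] => []
  | t :: rest =>
    match t.1 with
    | none => "<p>".toList ++ t.2 ++ "</p>\n".toList ++ pvRender rest
    | some l =>
      let p := pvItemRun l rest
      pvRep2 l ++ "<ul>\n".toList ++ pvRep2 (l + 1) ++ "<li>".toList ++ t.2
        ++ "</li>\n".toList ++ pvBody l p.1 ++ pvRep2 l ++ "</ul>\n".toList
        ++ pvRender p.2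
  termination_by ts => ts.length
  decreasing_by
  all_goals simp only [List.length_cons]
  all_goals first
    | omega
    | exact lt_of_le_of_lt (pvItemRun_snd_len _ _) (by simp)

def markdown_to_html_updated_alt (markdown_text : String) : String :=
  let lines := PySem.Chars.splitOn (PySem.Chars.strip markdown_text.toList) ['\n']
  String.ofList (PySem.Chars.strip (pvRender (pvTokenize lines)))

-- ===== PRECONDITION & SPEC =====
def Spec_markdown_to_html_updated (markdown_text : String) (out : String) : Prop := out = markdown_to_html_updated_alt markdown_text
instance (markdown_text : String) (out : String) : Decidable (Spec_markdown_to_html_updated markdown_text out) := by unfold Spec_markdown_to_html_updated; infer_instance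

-- ===== CLAIM (what is proved, stated in full; the proofs are below) =====
def Claim_equal_markdown_to_html_updated : Prop := ∀ (markdown_text : String), Dom_markdown_to_html_updated markdown_text → Spec_markdown_to_html_updated markdown_text (markdown_to_html_updated markdown_text)

-- ===== LEMMAS AND PROOFS =====

-- Proof-side intermediate: the line-level stack machine (stack of open levels, top first).
def pvCloseB (level : Int) (out : List (List Char)) : List Int → List (List Char) × List Int
  | [] => (out, [])
  | l :: stk =>
    if decide (level < l) then pvCloseB level (out ++ [pvRep2 l ++ "</ul>\n".toList]) stk
    else (out, l :: stk)

-- one machine step on a token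
def pvStepT (st : List (List Char) × List Int) (t : Option Int × List Char) :
    List (List Char) × List Int :=
  match t.1 with
  | none =>
    let cl := pvCloseB (-1) st.1 st.2
    (cl.1 ++ ["<p>".toList ++ t.2 ++ "</p>\n".toList], cl.2)
  | some l =>
    let cl := pvCloseB l st.1 st.2
    let opened :=
      if (match cl.2 with | [] => true | a :: _ => a != l) then
        (cl.1 ++ [pvRep2 l ++ "<ul>\n".toList], l :: cl.2)
      else cl
    (opened.1 ++ [pvRep2 (l + 1) ++ "<li>".toList ++ t.2 ++ "</li>\n".toList], opened.2)

-- one machine step on a raw line = parse then step on the token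
def pvStepB (st : List (List Char) × List Int) (line : List Char) :
    List (List Char) × List Int :=
  match pvParseTok line with
  | none => st
  | some t => pvStepT st t

-- A's dict state corresponds to the machine's stack: items are the stack's levels
-- bottom-to-top, all marked 'ul'; the stack is strictly decreasing top-down, levels ≥ 0.
def pvInv (d : PySem.Dict Int (List Char)) (stk : List Int) : Prop :=
  d.items = stk.reverse.map (fun l => (l, ['u', 'l'])) ∧
  stk.Pairwise (fun a b => b < a) ∧ ∀ l ∈ stk, 0 ≤ l

-- abbreviations used only in the proofs
def pvP (c : Int) : Int → Bool := fun l => decide (c < l)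
def pvPiece (l : Int) : List Char := pvRep2 l ++ "</ul>\n".toList
def pvPair (l : Int) : Int × List Char := (l, ['u', 'l'])

theorem pv_filter_eq_takeWhile (stk : List Int) (c : Int)
    (hp : stk.Pairwise (fun a b => b < a)) :
    stk.filter (pvP c) = stk.takeWhile (pvP c) := by
  induction stk with
  | nil => rfl
  | cons a t ih =>
    rcases List.pairwise_cons.1 hp with ⟨ha, ht⟩
    by_cases h : c < a
    · simp [pvP, h, ih ht]
    · have hfa : pvP c a = false := by simp [pvP]; omega
      rw [List.filter_cons_of_neg (by simp [hfa]), List.takeWhile_cons_of_neg (by simp [hfa])]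
      apply List.filter_eq_nil_iff.2
      intro x hx
      have := ha x hx
      simp [pvP]
      omega

theorem pv_nodup_of_desc (stk : List Int) (hp : stk.Pairwise (fun a b => b < a)) :
    stk.Nodup := hp.imp (fun h => (ne_of_gt h))

theorem pv_closeB_eq (c : Int) (out : List (List Char)) (stk : List Int) :
    pvCloseB c out stk =
      (out ++ (stk.takeWhile (pvP c)).map pvPiece, stk.dropWhile (pvP c)) := by
  induction stk generalizing out with
  | nil => simp [pvCloseB]
  | cons a t ih =>
    by_cases h : c < a
    · simp [pvCloseB, h, pvP, ih, pvPiece]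
    · simp [pvCloseB, h, pvP]

theorem pv_closeA_loop (t : List Int) (pre : List (Int × List Char)) (acc : List Char)
    (hnd : t.Nodup) (hdisj : ∀ l ∈ t, ∀ q ∈ pre, q.1 ≠ l) :
    t.foldl (fun (a : List Char × PySem.Dict Int (List Char)) lvl =>
        ((if PySem.Dict.getD a.2 lvl [] == ['u', 'l'] then
            a.1 ++ pvRep2 lvl ++ "</ul>\n".toList else a.1),
         PySem.Dict.erase a.2 lvl))
      (acc, ⟨pre ++ t.reverse.map pvPair⟩)
    = (acc ++ (t.map pvPiece).flatten, ⟨pre⟩) := by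
  induction t generalizing pre acc with
  | nil => simp
  | cons l t ih =>
    rcases List.nodup_cons.1 hnd with ⟨hl, hnd'⟩
    have hfindpre : List.find? (fun p => p.1 == l) pre = none := by
      apply List.find?_eq_none.2
      intro q hq
      simpa using hdisj l (by simp) q hq
    have hfindt : List.find? (fun p => p.1 == l) (t.reverse.map pvPair) = none := by
      apply List.find?_eq_none.2
      intro q hq
      rcases List.mem_map.1 hq with ⟨x, hx, rfl⟩
      simp only [pvPair, beq_iff_eq]
      intro hxl
      exact hl (by simpa [hxl] using List.mem_reverse.1 hx)
    have hitems : ((l :: t).reverse.map pvPair) = t.reverse.map pvPair ++ [pvPair l] := by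
      simp
    have hget : PySem.Dict.getD (⟨pre ++ ((l :: t).reverse.map pvPair)⟩ : PySem.Dict Int (List Char)) l [] = ['u', 'l'] := by
      rw [hitems, PySem.Dict.getD, PySem.Dict.get?]
      simp only [← List.append_assoc, List.find?_append, hfindpre, hfindt, Option.none_or]
      simp [pvPair]
    have herase : PySem.Dict.erase (⟨pre ++ ((l :: t).reverse.map pvPair)⟩ : PySem.Dict Int (List Char)) l = ⟨pre ++ t.reverse.map pvPair⟩ := by
      rw [hitems, PySem.Dict.erase]
      simp only [← List.append_assoc, List.filter_append, PySem.Dict.mk.injEq]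
      rw [List.filter_eq_self.2, List.filter_eq_self.2]
      · simp [pvPair]
      · intro q hq
        rcases List.mem_map.1 hq with ⟨x, hx, rfl⟩
        have hxl : x ≠ l := fun h => hl (by simpa [h] using List.mem_reverse.1 hx)
        simp [pvPair, hxl]
      · intro q hq
        simpa using hdisj l (by simp) q hq
    simp only [List.foldl_cons, hget, herase, BEq.rfl, if_pos]
    rw [ih pre (acc ++ pvRep2 l ++ "</ul>\n".toList) hnd'
      (fun x hx q hq => hdisj x (by simp [hx]) q hq)]
    simp [pvPiece]

theorem pv_closeA_eq (d : PySem.Dict Int (List Char)) (stk : List Int) (c : Int)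
    (hinv : pvInv d stk) :
    pvCloseA d c =
      (((stk.takeWhile (pvP c)).map pvPiece).flatten,
       ⟨(stk.dropWhile (pvP c)).reverse.map pvPair⟩) := by
  obtain ⟨hitems, hp, hnn⟩ := hinv
  have hnd : stk.Nodup := pv_nodup_of_desc stk hp
  have hd : d = ⟨stk.reverse.map pvPair⟩ := by cases d; simpa using hitems
  subst hd
  have hkeys : PySem.Dict.keys (⟨stk.reverse.map pvPair⟩ : PySem.Dict Int (List Char)) = stk.reverse := by
    simp only [PySem.Dict.keys, List.map_map, List.map_reverse]
    rw [show ((fun (x : Int × List Char) => x.1) ∘ pvPair) = id from funext (fun _ => rfl), List.map_id]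
  have hlev : PySem.List.sorted
      ((PySem.Dict.keys (⟨stk.reverse.map pvPair⟩ : PySem.Dict Int (List Char))).filter
        (fun l => decide (c < l))) (fun x => x) true = stk.takeWhile (pvP c) := by
    rw [hkeys, List.filter_reverse,
      show stk.filter (fun l => decide (c < l)) = stk.filter (pvP c) from rfl,
      pv_filter_eq_takeWhile stk c hp]
    exact PySem.List.sorted_rev_eq_of_perm_of_pairwise_gt _ _ _
      (List.reverse_perm _).symm (hp.sublist (List.takeWhile_sublist _))
  rw [pvCloseA, hlev]
  have hsplit : stk.reverse.map pvPair =
      (stk.dropWhile (pvP c)).reverse.map pvPair ++ (stk.takeWhile (pvP c)).reverse.map pvPair := by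
    conv_lhs => rw [← List.takeWhile_append_dropWhile (p := pvP c) (l := stk)]
    simp
    rw [← List.map_append, List.takeWhile_append_dropWhile]
  rw [hsplit]
  have hdisj : ∀ l ∈ stk.takeWhile (pvP c), ∀ q ∈ (stk.dropWhile (pvP c)).reverse.map pvPair, q.1 ≠ l := by
    intro l hl q hq
    rcases List.mem_map.1 hq with ⟨x, hx, rfl⟩
    have hx' : x ∈ stk.dropWhile (pvP c) := List.mem_reverse.1 hx
    have hdis : List.Disjoint (stk.takeWhile (pvP c)) (stk.dropWhile (pvP c)) := by
      have h2 := hnd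
      rw [← List.takeWhile_append_dropWhile (p := pvP c) (l := stk)] at h2
      exact List.disjoint_of_nodup_append h2
    intro hql
    have hxeq : x = l := by simpa [pvPair] using hql
    exact hdis hl (hxeq ▸ hx')
  have := pv_closeA_loop (stk.takeWhile (pvP c)) ((stk.dropWhile (pvP c)).reverse.map pvPair) []
      (hnd.sublist (List.takeWhile_sublist _)) hdisj
  simpa using this

theorem pv_drop_le (stk : List Int) (c : Int) (hp : stk.Pairwise (fun a b => b < a)) :
    ∀ l ∈ stk.dropWhile (pvP c), l ≤ c := by
  induction stk with
  | nil => simp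
  | cons a t ih =>
    rcases List.pairwise_cons.1 hp with ⟨ha, ht⟩
    by_cases h : c < a
    · rw [List.dropWhile_cons_of_pos (by simp [pvP, h])]
      exact ih ht
    · rw [List.dropWhile_cons_of_neg (by simp [pvP, h])]
      intro l hl
      rcases List.mem_cons.1 hl with rfl | hl
      · omega
      · have := ha l hl; omega

theorem pv_contains_eq (stk : List Int) (c : Int)
    (hp : stk.Pairwise (fun a b => b < a)) (hle : ∀ l ∈ stk, l ≤ c) :
    PySem.Dict.contains (⟨stk.reverse.map pvPair⟩ : PySem.Dict Int (List Char)) c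
      = !(match stk with | [] => true | t :: _ => t != c) := by
  cases stk with
  | nil => simp [PySem.Dict.contains]
  | cons a t =>
    rcases List.pairwise_cons.1 hp with ⟨ha, _⟩
    by_cases hac : a = c
    · simp [PySem.Dict.contains, pvPair, hac]
    · have hnt : ∀ x ∈ t, ¬(x == c) = true := by
        intro x hx
        have h1 := ha x hx
        have h2 := hle a (by simp)
        simp only [beq_iff_eq]
        omega
      simp only [PySem.Dict.contains, List.any_map, List.any_reverse, bne]
      simp [pvPair, List.any_cons, hac]
      intro hx
      have h1 := ha c hx
      have h2 := hle a (by simp)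
      omega

theorem pv_indent_eq (line : List Char) : pvIndentA line = pvIndentB line := by
  have h : pvCountSpacesA line
      = (line.length : Int) - ((line.dropWhile (fun c => c == ' ')).length : Int) := by
    induction line with
    | nil => simp [pvCountSpacesA]
    | cons a t ih =>
      by_cases h : a = ' '
      · rw [pvCountSpacesA, if_pos h, List.dropWhile_cons_of_pos (by simp [h]), ih]
        simp; omega
      · rw [pvCountSpacesA, if_neg h, List.dropWhile_cons_of_neg (by simp [h])]
        simp
  rw [pvIndentA, pvIndentB, h]

theorem pv_indent_nonneg (line : List Char) : 0 ≤ pvIndentB line := by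
  rw [pvIndentB]
  have h := List.length_dropWhile_le (fun c => c == ' ') line
  rw [PySem.Int.floordiv_eq_ediv_of_pos (by omega)]
  apply Int.ediv_nonneg <;> omega

theorem pv_marker_eq (s : List Char) :
    (PySem.Chars.startswith s ['-'] || PySem.Chars.startswith s ['*']
      || PySem.Chars.startswith s ['+'])
    = (match PySem.List.pyGet? s 0 with
        | some c => PySem.Chars.isIn [c] ['-', '*', '+']
        | none => false) := by
  cases s with
  | nil => decide
  | cons c t =>
    have hget : PySem.List.pyGet? (c :: t) 0 = some c := by
      simp [PySem.List.pyGet?, PySem.List.pyIdx?]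
    rw [hget]
    rw [Bool.eq_iff_iff]
    simp only [Bool.or_eq_true, PySem.Chars.startswith_iff, PySem.Chars.isIn_iff_infix,
      List.singleton_infix_iff, List.cons_prefix_cons]
    simp [eq_comm, or_assoc]

theorem pv_push_pairwise (stk : List Int) (c : Int)
    (hp : stk.Pairwise (fun a b => b < a)) (hle : ∀ l ∈ stk, l ≤ c)
    (hcond : (match stk with | [] => true | t :: _ => t != c) = true) :
    (c :: stk).Pairwise (fun a b => b < a) := by
  apply List.pairwise_cons.2
  refine ⟨?_, hp⟩
  intro x hx
  cases stk with
  | nil => simp at hx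
  | cons a t =>
    rcases List.pairwise_cons.1 hp with ⟨ha, _⟩
    have hac : a ≠ c := by simpa [bne] using hcond
    have h2 := hle a (by simp)
    rcases List.mem_cons.1 hx with rfl | hx
    · omega
    · have := ha x hx; omega

theorem pv_step (line : List Char) (hA : List (List Char)) (d : PySem.Dict Int (List Char))
    (oB : List (List Char)) (stk : List Int)
    (hinv : pvInv d stk) (hout : hA.flatten = oB.flatten) :
    (pvStepA (hA, d) line).1.flatten = (pvStepB (oB, stk) line).1.flatten ∧
    pvInv (pvStepA (hA, d) line).2 (pvStepB (oB, stk) line).2 := by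
  obtain ⟨hitems, hp, hnn⟩ := hinv
  rw [pvStepA, pvStepB, pvParseTok]
  by_cases hs : PySem.Chars.strip line = []
  · simp only [hs, if_true]
    exact ⟨hout, hitems, hp, hnn⟩
  · simp only [if_neg hs]
    rw [← pv_marker_eq]
    by_cases hitem : ((PySem.Chars.startswith (PySem.Chars.strip line) ['-']
        || PySem.Chars.startswith (PySem.Chars.strip line) ['*']
        || PySem.Chars.startswith (PySem.Chars.strip line) ['+'])
      && (PySem.List.slice (PySem.Chars.strip line) (some 1) (some 2) == [' '])) = true
    · rw [if_pos hitem, if_pos hitem]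
      simp only [pvStepT]
      rw [pv_indent_eq line]
      rw [pv_closeA_eq d stk (pvIndentB line) ⟨hitems, hp, hnn⟩,
        pv_closeB_eq (pvIndentB line) oB stk]
      have hp' : (stk.dropWhile (pvP (pvIndentB line))).Pairwise (fun a b => b < a) :=
        hp.sublist (List.dropWhile_sublist _)
      have hle : ∀ l ∈ stk.dropWhile (pvP (pvIndentB line)), l ≤ pvIndentB line :=
        pv_drop_le stk _ hp
      have hnn' : ∀ l ∈ stk.dropWhile (pvP (pvIndentB line)), 0 ≤ l :=
        fun l hl => hnn l ((List.dropWhile_sublist _).mem hl)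
      rw [pv_contains_eq _ _ hp' hle]
      generalize hdr : stk.dropWhile (pvP (pvIndentB line)) = drp at hp' hle hnn' ⊢
      clear hdr
      cases drp with
      | nil =>
        have hins : PySem.Dict.insert (⟨([] : List Int).reverse.map pvPair⟩ : PySem.Dict Int (List Char))
            (pvIndentB line) ['u', 'l'] = ⟨[(pvIndentB line, ['u', 'l'])]⟩ := by
          simp [PySem.Dict.insert, PySem.Dict.contains]
        simp only [hins]
        refine ⟨by simp [hout], by simp, ?_, ?_⟩
        · exact List.pairwise_cons.2 ⟨by simp, List.Pairwise.nil⟩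
        · intro l hl
          rcases List.mem_cons.1 hl with rfl | hl
          · exact pv_indent_nonneg line
          · simp at hl
      | cons a t =>
        by_cases hbne : (a != pvIndentB line) = true
        · have hcf : PySem.Dict.contains (⟨(a :: t).reverse.map pvPair⟩ : PySem.Dict Int (List Char))
              (pvIndentB line) = false := by
            rw [pv_contains_eq (a :: t) _ hp' hle]
            simp only [hbne, Bool.not_true]
          have hins : PySem.Dict.insert (⟨(a :: t).reverse.map pvPair⟩ : PySem.Dict Int (List Char))
              (pvIndentB line) ['u', 'l'] = ⟨(pvIndentB line :: a :: t).reverse.map pvPair⟩ := by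
            rw [PySem.Dict.insert, if_neg (by rw [hcf]; simp)]
            simp [pvPair]
          simp only [hbne, hins, Bool.not_true, Bool.false_eq_true, if_false, if_true]
          refine ⟨by simp [hout], rfl, ?_, ?_⟩
          · exact pv_push_pairwise (a :: t) _ hp' hle hbne
          · intro l hl
            rcases List.mem_cons.1 hl with rfl | hl
            · exact pv_indent_nonneg line
            · exact hnn' l hl
        · rw [Bool.not_eq_true] at hbne
          simp only [hbne, Bool.not_false, if_true, Bool.false_eq_true, if_false]
          exact ⟨by simp [hout], rfl, hp', hnn'⟩
    · rw [if_neg hitem, if_neg hitem]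
      simp only [pvStepT]
      rw [pv_closeA_eq d stk (-1) ⟨hitems, hp, hnn⟩, pv_closeB_eq (-1) oB stk]
      refine ⟨by simp [hout], by simp [pvPair], hp.sublist (List.dropWhile_sublist _),
        fun l hl => hnn l ((List.dropWhile_sublist _).mem hl)⟩

theorem pv_fold (lines : List (List Char)) (hA : List (List Char))
    (d : PySem.Dict Int (List Char)) (oB : List (List Char)) (stk : List Int)
    (hinv : pvInv d stk) (hout : hA.flatten = oB.flatten) :
    (lines.foldl pvStepA (hA, d)).1.flatten = (lines.foldl pvStepB (oB, stk)).1.flatten ∧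
    pvInv (lines.foldl pvStepA (hA, d)).2 (lines.foldl pvStepB (oB, stk)).2 := by
  induction lines generalizing hA d oB stk with
  | nil => exact ⟨hout, hinv⟩
  | cons line rest ih =>
    obtain ⟨h1, h2⟩ := pv_step line hA d oB stk hinv hout
    simp only [List.foldl_cons]
    have := ih (pvStepA (hA, d) line).1 (pvStepA (hA, d) line).2
      (pvStepB (oB, stk) line).1 (pvStepB (oB, stk) line).2 h2 h1
    simpa using this

theorem pv_intercalate_nil (l : List (List Char)) : List.intercalate [] l = l.flatten := by
  induction l with
  | nil => rfl
  | cons a t ih =>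
    cases t with
    | nil => simp [List.intercalate]
    | cons b u =>
      simp only [List.intercalate, List.intersperse] at *
      simp_all

-- the tokenizer's foldl-with-append is filterMap
theorem pv_tokenize_eq (lines : List (List Char)) (acc : List (Option Int × List Char)) :
    lines.foldl (fun acc line => match pvParseTok line with
      | none => acc
      | some t => acc ++ [t]) acc = acc ++ lines.filterMap pvParseTok := by
  induction lines generalizing acc with
  | nil => simp
  | cons line rest ih =>
    simp only [List.foldl_cons, List.filterMap_cons]
    cases h : pvParseTok line with
    | none => simp [ih]
    | some t => simp [ih]

-- running the line machine = running the token machine on the tokenized lines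
theorem pv_foldB_tok (lines : List (List Char)) (st : List (List Char) × List Int) :
    lines.foldl pvStepB st = (lines.filterMap pvParseTok).foldl pvStepT st := by
  induction lines generalizing st with
  | nil => rfl
  | cons line rest ih =>
    simp only [List.foldl_cons, List.filterMap_cons, pvStepB]
    cases h : pvParseTok line with
    | none => simp [ih]
    | some t => simp [ih]

-- emitted-forward form of the token machine, with the final close-everything folded in
def pvCloseF (c : Int) (stk : List Int) : List Char :=
  ((stk.takeWhile (pvP c)).map pvPiece).flatten

def pvM : List (Option Int × List Char) → List Int → List Char
  | [], stk => pvCloseF (-1) stk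
  | t :: ts, stk =>
    match t.1 with
    | none =>
      pvCloseF (-1) stk ++ "<p>".toList ++ t.2 ++ "</p>\n".toList
        ++ pvM ts (stk.dropWhile (pvP (-1)))
    | some l =>
      let s1 := stk.dropWhile (pvP l)
      let pushed := (match s1 with | [] => true | a :: _ => a != l)
      pvCloseF l stk ++ (if pushed then pvRep2 l ++ "<ul>\n".toList else [])
        ++ pvRep2 (l + 1) ++ "<li>".toList ++ t.2 ++ "</li>\n".toList
        ++ pvM ts (if pushed then l :: s1 else s1)

theorem pv_M_fold (ts : List (Option Int × List Char)) (out : List (List Char))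
    (stk : List Int) :
    ((pvCloseB (-1) (ts.foldl pvStepT (out, stk)).1 (ts.foldl pvStepT (out, stk)).2).1).flatten
      = out.flatten ++ pvM ts stk := by
  induction ts generalizing out stk with
  | nil => simp [pvM, pv_closeB_eq, pvCloseF]
  | cons t ts ih =>
    simp only [List.foldl_cons]
    cases h : t.1 with
    | none =>
      have hstep : pvStepT (out, stk) t
          = (out ++ (stk.takeWhile (pvP (-1))).map pvPiece
              ++ ["<p>".toList ++ t.2 ++ "</p>\n".toList], stk.dropWhile (pvP (-1))) := by
        rw [pvStepT, h]
        simp [pv_closeB_eq]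
      rw [hstep, ih]
      simp [pvM, h, pvCloseF]
    | some l =>
      by_cases hpu : (match stk.dropWhile (pvP l) with | [] => true | a :: _ => a != l) = true
      · have hstep : pvStepT (out, stk) t
            = (out ++ (stk.takeWhile (pvP l)).map pvPiece
                ++ [pvRep2 l ++ "<ul>\n".toList]
                ++ [pvRep2 (l + 1) ++ "<li>".toList ++ t.2 ++ "</li>\n".toList],
               l :: stk.dropWhile (pvP l)) := by
          simp only [pvStepT, h, pv_closeB_eq, hpu, if_pos]
          try simp
        rw [hstep, ih]
        simp only [pvM, h, hpu, if_pos]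
        simp [pvCloseF]
      · have hstep : pvStepT (out, stk) t
            = (out ++ (stk.takeWhile (pvP l)).map pvPiece
                ++ [pvRep2 (l + 1) ++ "<li>".toList ++ t.2 ++ "</li>\n".toList],
               stk.dropWhile (pvP l)) := by
          simp only [pvStepT, h, pv_closeB_eq, hpu]
          try simp
        rw [hstep, ih]
        simp only [pvM, h, hpu]
        simp [pvCloseF]

-- takeWhile/dropWhile algebra for nested runs (q stronger than p)
theorem pv_tw_tw {α : Type} (p q : α → Bool) (himp : ∀ a, q a = true → p a = true)
    (ts : List α) : ts.takeWhile q = (ts.takeWhile p).takeWhile q := by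
  induction ts with
  | nil => rfl
  | cons a t ih =>
    by_cases hq : q a = true
    · rw [List.takeWhile_cons_of_pos hq, List.takeWhile_cons_of_pos (himp a hq),
        List.takeWhile_cons_of_pos hq, ih]
    · rw [List.takeWhile_cons_of_neg (by simpa using hq)]
      by_cases hp : p a = true
      · rw [List.takeWhile_cons_of_pos hp, List.takeWhile_cons_of_neg (by simpa using hq)]
      · rw [List.takeWhile_cons_of_neg (by simpa using hp)]
        simp
  
theorem pv_dw_tw {α : Type} (p q : α → Bool) (himp : ∀ a, q a = true → p a = true)
    (ts : List α) : (ts.dropWhile q).takeWhile p = (ts.takeWhile p).dropWhile q := by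
  induction ts with
  | nil => rfl
  | cons a t ih =>
    by_cases hq : q a = true
    · rw [List.dropWhile_cons_of_pos hq, List.takeWhile_cons_of_pos (himp a hq),
        List.dropWhile_cons_of_pos hq, ih]
    · rw [List.dropWhile_cons_of_neg (by simpa using hq)]
      by_cases hp : p a = true
      · rw [List.takeWhile_cons_of_pos hp, List.dropWhile_cons_of_neg (by simpa using hq)]
      · rw [List.takeWhile_cons_of_neg (by simpa using hp)]
        simp
  
theorem pv_dw_dw {α : Type} (p q : α → Bool) (himp : ∀ a, q a = true → p a = true)
    (ts : List α) : (ts.dropWhile q).dropWhile p = ts.dropWhile p := by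
  induction ts with
  | nil => rfl
  | cons a t ih =>
    by_cases hq : q a = true
    · rw [List.dropWhile_cons_of_pos hq, List.dropWhile_cons_of_pos (himp a hq), ih]
    · rw [List.dropWhile_cons_of_neg (by simpa using hq)]

theorem pv_itemRun_eq (level : Int) (ts : List (Option Int × List Char)) :
    pvItemRun level ts = (ts.takeWhile (pvRunP level), ts.dropWhile (pvRunP level)) := by
  induction ts with
  | nil => rfl
  | cons t rest ih =>
    rw [pvItemRun]
    by_cases h : pvRunP level t = true
    · rw [if_pos h, ih, List.takeWhile_cons_of_pos h, List.dropWhile_cons_of_pos h]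
    · rw [if_neg h, List.takeWhile_cons_of_neg (by simpa using h),
        List.dropWhile_cons_of_neg (by simpa using h)]

theorem pv_runP_imp (l l2 : Int) (hll : l ≤ l2) (t : Option Int × List Char)
    (h : pvRunP l2 t = true) : pvRunP l t = true := by
  rcases t with ⟨lo, c⟩
  cases lo with
  | none => simp [pvRunP] at h
  | some l3 =>
    simp only [pvRunP, decide_eq_true_eq] at *
    omega

-- the machine inside an open <ul> at level l equals pvBody on the run, then the close,
-- then the machine on the rest
theorem pv_run (n : ℕ) (ts : List (Option Int × List Char)) (l : Int) (stk : List Int)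
    (hn : ts.length ≤ n) (hl : 0 ≤ l) (hstk : ∀ x ∈ stk, 0 ≤ x ∧ x < l) :
    pvM ts (l :: stk)
      = pvBody l (ts.takeWhile (pvRunP l)) ++ pvPiece l
        ++ pvM (ts.dropWhile (pvRunP l)) stk := by
  induction n generalizing ts l stk with
  | zero =>
    have : ts = [] := List.eq_nil_of_length_eq_zero (by omega)
    subst this
    simp only [List.takeWhile_nil, List.dropWhile_nil]
    simp only [pvM, pvBody, pvCloseF]
    rw [List.takeWhile_cons_of_pos (by simp [pvP]; omega)]
    have : stk.takeWhile (pvP (-1)) = stk := by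
      apply List.takeWhile_eq_self_iff.2
      intro x hx
      have := hstk x hx
      simp [pvP]; omega
    simp [this, pvPiece]
  | succ n ih =>
    cases ts with
    | nil =>
      simp only [List.takeWhile_nil, List.dropWhile_nil]
      simp only [pvM, pvBody, pvCloseF]
      rw [List.takeWhile_cons_of_pos (by simp [pvP]; omega)]
      have : stk.takeWhile (pvP (-1)) = stk := by
        apply List.takeWhile_eq_self_iff.2
        intro x hx
        have := hstk x hx
        simp [pvP]; omega
      simp [this, pvPiece]
    | cons t ts =>
      have hlen : ts.length ≤ n := by simp at hn; omega
      cases ht : t.1 with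
      | none =>
        have hrp : pvRunP l t = false := by simp [pvRunP, ht]
        rw [List.takeWhile_cons_of_neg (by simp [hrp]),
          List.dropWhile_cons_of_neg (by simp [hrp])]
        simp only [pvM, ht, pvBody]
        have h1 : pvCloseF (-1) (l :: stk) = pvPiece l ++ pvCloseF (-1) stk := by
          simp only [pvCloseF]
          rw [List.takeWhile_cons_of_pos (by simp [pvP]; omega)]
          simp
        have h2 : (l :: stk).dropWhile (pvP (-1)) = stk.dropWhile (pvP (-1)) := by
          rw [List.dropWhile_cons_of_pos (by simp [pvP]; omega)]
        rw [h1, h2]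
        simp
      | some l2 =>
        by_cases hge : l ≤ l2
        · have hrp : pvRunP l t = true := by simp [pvRunP, ht]; omega
          rw [List.takeWhile_cons_of_pos hrp, List.dropWhile_cons_of_pos hrp]
          by_cases heq : l2 = l
          · -- same level: emit the <li>, stay
            subst heq
            simp only [pvM, ht]
            have hcf : pvCloseF l2 (l2 :: stk) = [] := by
              rw [pvCloseF, List.takeWhile_cons_of_neg (by simp [pvP])]
              simp
            have hdw : (l2 :: stk).dropWhile (pvP l2) = l2 :: stk := by
              rw [List.dropWhile_cons_of_neg (by simp [pvP])]
            rw [hcf, hdw]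
            simp only [bne_self_eq_false, Bool.false_eq_true, if_false]
            rw [ih ts l2 stk hlen hl hstk]
            rw [pvBody]
            simp only [ht, BEq.rfl, if_pos]
            simp
          · -- deeper: open a nested <ul>, recurse, then continue at level l
            have hlt : l < l2 := by omega
            simp only [pvM, ht]
            have hcf : pvCloseF l2 (l :: stk) = [] := by
              rw [pvCloseF, List.takeWhile_cons_of_neg (by simp [pvP]; omega)]
              simp
            have hdw : (l :: stk).dropWhile (pvP l2) = l :: stk := by
              rw [List.dropWhile_cons_of_neg (by simp [pvP]; omega)]
            rw [hcf, hdw]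
            have hpush : (l != l2) = true := by simp [bne]; omega
            simp only [hpush, if_pos]
            have himp := pv_runP_imp l l2 hge
            have hstk2 : ∀ x ∈ l :: stk, 0 ≤ x ∧ x < l2 := by
              intro x hx
              rcases List.mem_cons.1 hx with rfl | hx
              · omega
              · have := hstk x hx; omega
            rw [ih ts l2 (l :: stk) hlen (by omega) hstk2]
            have hlen2 : (ts.dropWhile (pvRunP l2)).length ≤ n :=
              le_trans (List.length_dropWhile_le _ _) hlen
            rw [ih (ts.dropWhile (pvRunP l2)) l stk hlen2 hl hstk]
            rw [pvBody]
            simp only [ht]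
            rw [if_neg (by simpa using heq)]
            simp only [pv_itemRun_eq]
            rw [← pv_tw_tw _ _ himp ts, pv_dw_tw _ _ himp ts, pv_dw_dw _ _ himp ts]
            simp [pvPiece]
        · -- shallower item: pop this <ul>, re-examine the token one level up
          have hrp : pvRunP l t = false := by simp [pvRunP, ht]; omega
          rw [List.takeWhile_cons_of_neg (by simp [hrp]),
            List.dropWhile_cons_of_neg (by simp [hrp])]
          simp only [pvBody, pvM, ht]
          have hcf : pvCloseF l2 (l :: stk) = pvPiece l ++ pvCloseF l2 stk := by
            rw [pvCloseF, pvCloseF, List.takeWhile_cons_of_pos (by simp [pvP]; omega)]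
            simp
          have hdw : (l :: stk).dropWhile (pvP l2) = stk.dropWhile (pvP l2) := by
            rw [List.dropWhile_cons_of_pos (by simp [pvP]; omega)]
          rw [hcf, hdw]
          simp

-- the machine from the empty stack is the recursive-descent renderer
theorem pv_top (n : ℕ) (ts : List (Option Int × List Char)) (hn : ts.length ≤ n)
    (hnn : ∀ t ∈ ts, ∀ l, t.1 = some l → 0 ≤ l) :
    pvM ts [] = pvRender ts := by
  induction n generalizing ts with
  | zero =>
    have : ts = [] := List.eq_nil_of_length_eq_zero (by omega)
    subst this
    simp [pvM, pvRender, pvCloseF]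
  | succ n ih =>
    cases ts with
    | nil =>
      simp [pvM, pvRender, pvCloseF]
    | cons t ts =>
      have hlen : ts.length ≤ n := by simp at hn; omega
      cases ht : t.1 with
      | none =>
        simp only [pvM, pvRender, ht, List.dropWhile_nil]
        rw [ih ts hlen (fun x hx => hnn x (by simp [hx]))]
        simp [pvCloseF]
      | some l =>
        have hl : 0 ≤ l := hnn t (by simp) l ht
        simp only [pvM, pvRender, ht, List.dropWhile_nil]
        have hcf : pvCloseF l ([] : List Int) = [] := by simp [pvCloseF]
        rw [hcf]
        simp only [if_true]
        rw [pv_run n ts l [] hlen hl (by simp)]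
        have hlen2 : (ts.dropWhile (pvRunP l)).length ≤ n :=
          le_trans (List.length_dropWhile_le _ _) hlen
        rw [ih (ts.dropWhile (pvRunP l)) hlen2
          (fun x hx => hnn x (by simp [(List.dropWhile_sublist _).mem hx]))]
        simp only [pv_itemRun_eq, pvPiece]
        simp

theorem pv_tok_nonneg (lines : List (List Char)) :
    ∀ t ∈ lines.filterMap pvParseTok, ∀ l, t.1 = some l → 0 ≤ l := by
  intro t ht l hl
  rcases List.mem_filterMap.1 ht with ⟨line, _, hp⟩
  simp only [pvParseTok] at hp
  by_cases h1 : PySem.Chars.strip line = []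
  · rw [if_pos h1] at hp
    cases hp
  · rw [if_neg h1] at hp
    by_cases hb : ((match PySem.List.pyGet? (PySem.Chars.strip line) 0 with
        | some c => PySem.Chars.isIn [c] ['-', '*', '+']
        | none => false)
      && (PySem.List.slice (PySem.Chars.strip line) (some 1) (some 2) == [' '])) = true
    · rw [if_pos hb] at hp
      injection hp with h
      subst h
      simp only at hl
      cases hl
      exact pv_indent_nonneg line
    · rw [if_neg hb] at hp
      injection hp with h
      subst h
      simp at hl

-- ===== VERDICT (by name: the statement is the Claim_ definition above) =====
theorem markdown_to_html_updated_spec : Claim_equal_markdown_to_html_updated := by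
  intro s _
  unfold Spec_markdown_to_html_updated markdown_to_html_updated markdown_to_html_updated_alt
  dsimp only
  obtain ⟨h1, hitems, hp, hnn⟩ := pv_fold
    (PySem.Chars.splitOn (PySem.Chars.strip s.toList) ['\n']) [] (PySem.Dict.mk []) [] []
    ⟨rfl, List.Pairwise.nil, by simp⟩ rfl
  set lines := PySem.Chars.splitOn (PySem.Chars.strip s.toList) ['\n'] with hlines
  set rA := lines.foldl pvStepA ([], PySem.Dict.mk [])
  set rB := lines.foldl pvStepB ([], [])
  have hA : (rA.1 ++ [(pvCloseA rA.2 (-1)).1]).flatten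
      = ((pvCloseB (-1) rB.1 rB.2).1).flatten := by
    rw [pv_closeA_eq rA.2 rB.2 (-1) ⟨hitems, hp, hnn⟩, pv_closeB_eq (-1) rB.1 rB.2]
    simp [h1]
  have hTok : rB = (lines.filterMap pvParseTok).foldl pvStepT ([], []) := pv_foldB_tok lines _
  have hM : ((pvCloseB (-1) rB.1 rB.2).1).flatten
      = pvM (lines.filterMap pvParseTok) [] := by
    rw [hTok]
    have := pv_M_fold (lines.filterMap pvParseTok) [] []
    simpa using this
  have hR : pvM (lines.filterMap pvParseTok) [] = pvRender (lines.filterMap pvParseTok) :=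
    pv_top (lines.filterMap pvParseTok).length _ le_rfl (pv_tok_nonneg lines)
  have hTk : pvTokenize lines = lines.filterMap pvParseTok := by
    rw [pvTokenize]
    simpa using pv_tokenize_eq lines []
  rw [PySem.Chars.join, pv_intercalate_nil, hA, hM, hR, hTk]
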